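-- pv_equiv track=rewrite | github.com/hoangthangta/Wikidata2Text | corpus_estimation.py | rank_sentence_by_redundant_words
-- ===== SOURCE A (Python) =====
-- def rank_sentence_by_redundant_words(redundants):
--
--     count_dict = {}
--     for r in redundants:
--         if (r not in count_dict):
--             count_dict[r] = 1
--         else:
--             count_dict[r] += 1
--
--     count_dict = sorted(count_dict.items(), key=lambda x: x[0])
--
--     return count_dict
-- ===== SOURCE B (Python) =====
-- def rank_sentence_by_redundant_words(redundants):
--     # sort first, then one pass counting maximal runs of equal adjacent elements; no frequency dict
--     s = sorted(redundants)
--     out = []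
--     i, n = 0, len(s)
--     while i < n:
--         j = i + 1
--         while j < n and s[j] == s[i]:
--             j += 1
--         out.append((s[i], j - i))
--         i = j
--     return out
-- ===== Notes on version B (the rewrite author's own statement) =====
-- stated objective: alternative
-- what changed: B builds no frequency dictionary: it sorts the raw list first and then makes one pass emitting (key, run-length) for each maximal run of equal adjacent elements, instead of A's dict-counting pass followed by sorting the dict items.
import Mathlib
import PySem

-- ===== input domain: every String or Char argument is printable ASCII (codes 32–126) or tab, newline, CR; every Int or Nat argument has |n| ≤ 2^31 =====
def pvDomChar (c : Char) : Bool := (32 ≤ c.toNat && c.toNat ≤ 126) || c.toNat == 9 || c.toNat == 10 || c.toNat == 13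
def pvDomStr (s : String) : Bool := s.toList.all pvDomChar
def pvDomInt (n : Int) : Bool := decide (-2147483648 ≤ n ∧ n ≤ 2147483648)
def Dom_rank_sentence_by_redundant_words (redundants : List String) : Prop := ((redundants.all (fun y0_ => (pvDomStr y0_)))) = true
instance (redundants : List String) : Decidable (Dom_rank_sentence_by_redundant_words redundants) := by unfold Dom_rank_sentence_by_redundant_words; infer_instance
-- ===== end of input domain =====

-- B replaces A's dict-counting pass + sort of the items by sorting the raw list first and emitting (key, run-length) for each maximal run of equal adjacent elements in one pass (objective: alternative decomposition, same O(n log n) cost).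


-- ===== PORT A =====
def rank_sentence_by_redundant_words (redundants : List String) : List (String × Int) :=
  let count_dict : PySem.Dict String Int :=
    redundants.foldl (fun d r =>
      if d.contains r = false then d.insert r 1 else d.insert r (d.getD r 0 + 1))
      PySem.Dict.empty
  PySem.List.sorted count_dict.items (fun x => x.1) false

-- ===== PORT B =====
def pvRunLen (x : String) : List String → Nat
  | [] => 0
  | y :: ys => if y == x then pvRunLen x ys + 1 else 0

def pvGroupRuns : List String → List (String × Int)
  | [] => []
  | x :: rest =>
      let n := pvRunLen x rest
      (x, (n : Int) + 1) :: pvGroupRuns (rest.drop n)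
termination_by l => l.length
decreasing_by simp

def rank_sentence_by_redundant_words_alt (redundants : List String) : List (String × Int) :=
  pvGroupRuns (PySem.List.sorted redundants (fun x => x) false)

-- ===== PRECONDITION & SPEC =====
def Spec_rank_sentence_by_redundant_words (redundants : List String) (out : List (String × Int)) : Prop := out = rank_sentence_by_redundant_words_alt redundants
instance (redundants : List String) (out : List (String × Int)) : Decidable (Spec_rank_sentence_by_redundant_words redundants out) := by unfold Spec_rank_sentence_by_redundant_words; infer_instance

-- ===== CLAIM (what is proved, stated in full; the proofs are below) =====
def Claim_equal_rank_sentence_by_redundant_words : Prop := ∀ (redundants : List String), Dom_rank_sentence_by_redundant_words redundants → Spec_rank_sentence_by_redundant_words redundants (rank_sentence_by_redundant_words redundants)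

-- ===== LEMMAS AND PROOFS =====

lemma pvFoldA_eq_counter (xs : List String) :
    xs.foldl (fun d r =>
      if d.contains r = false then d.insert r 1 else d.insert r (d.getD r 0 + 1))
      PySem.Dict.empty = PySem.Dict.counter xs := by
  rw [← PySem.Dict.foldl_insert_getD_add_one_eq_counter]
  apply PySem.List.foldl_congr_mem
  intro d r _
  by_cases h : d.contains r = false
  · simp [h, PySem.Dict.getD_of_not_contains d 0 h]
  · simp [h]

lemma pvRunLen_spec (x : String) (l : List String)
    (hall : ∀ y ∈ l, x ≤ y) (hp : l.Pairwise (· ≤ ·)) :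
    l.take (pvRunLen x l) = List.replicate (pvRunLen x l) x ∧ x ∉ l.drop (pvRunLen x l) := by
  induction l with
  | nil => simp [pvRunLen]
  | cons y ys ih =>
    rcases List.pairwise_cons.mp hp with ⟨hy, hys⟩
    by_cases hxy : y == x
    · have hxyeq : y = x := by simpa using hxy
      subst hxyeq
      have := ih (fun z hz => hy z hz) hys
      simp [pvRunLen, this.1, this.2, List.replicate_succ]
    · have hne : y ≠ x := by simpa using hxy
      simp only [pvRunLen, if_neg hxy]
      refine ⟨by simp, ?_⟩
      simp only [List.drop_zero, List.mem_cons]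
      rintro (h | h)
      · exact hne h.symm
      · have h1 : x ≤ y := hall y (by simp)
        have h2 : y ≤ x := hy x h
        exact hne (le_antisymm h2 h1)

lemma pvGroupRuns_spec (s : List String) :
    s.Pairwise (· ≤ ·) →
    (∀ p ∈ pvGroupRuns s, p.2 = (List.count p.1 s : Int)) ∧
    (∀ k, k ∈ (pvGroupRuns s).map Prod.fst ↔ k ∈ s) ∧
    (pvGroupRuns s).Pairwise (fun a b => a.1 < b.1) := by
  induction s using pvGroupRuns.induct with
  | case1 => intro _; simp [pvGroupRuns]
  | case2 x rest nn ih =>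
    intro hp
    rcases List.pairwise_cons.mp hp with ⟨hx, hrest⟩
    have hrun := pvRunLen_spec x rest (fun y hy => hx y hy) hrest
    set n := pvRunLen x rest with hn
    set t := rest.drop n with htdef
    have hsplit : rest = List.replicate n x ++ t := by
      conv_lhs => rw [← List.take_append_drop n rest]
      rw [hrun.1]
    have hnotin : x ∉ t := hrun.2
    have hpd : t.Pairwise (· ≤ ·) := hrest.sublist (List.drop_sublist n rest)
    have hlt : ∀ y ∈ t, x < y := by
      intro y hy
      have hle : x ≤ y := hx y (by rw [hsplit]; exact List.mem_append_right _ hy)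
      exact lt_of_le_of_ne hle (fun h => hnotin (h ▸ hy))
    obtain ⟨ih1, ih2, ih3⟩ := ih hpd
    have hct : List.count x t = 0 := List.count_eq_zero.mpr hnotin
    have hcount_x : List.count x (x :: rest) = n + 1 := by
      rw [hsplit, List.count_cons_self, List.count_append, List.count_replicate, hct]
      simp
    have hcount_ne : ∀ k, k ≠ x → List.count k (x :: rest) = List.count k t := by
      intro k hk
      rw [hsplit]
      simp [List.count_replicate, Ne.symm hk]
    have heq : pvGroupRuns (x :: rest) = (x, (n : Int) + 1) :: pvGroupRuns t := by
      rw [pvGroupRuns]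
    rw [heq]
    refine ⟨?_, ?_, ?_⟩
    · intro p hp'
      rcases List.mem_cons.mp hp' with hph | hpt
      · subst hph; simp [hcount_x]
      · have hkmem : p.1 ∈ t := (ih2 p.1).mp (List.mem_map_of_mem hpt)
        have hkx : p.1 ≠ x := fun h => hnotin (h ▸ hkmem)
        rw [ih1 p hpt, hcount_ne p.1 hkx]
    · intro k
      simp only [List.map_cons, List.mem_cons, ih2]
      constructor
      · rintro (h | h)
        · exact Or.inl h
        · exact Or.inr (by rw [hsplit]; exact List.mem_append_right _ h)
      · rintro (h | h)
        · exact Or.inl h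
        · rw [hsplit] at h
          rcases List.mem_append.mp h with h' | h'
          · exact Or.inl (List.eq_of_mem_replicate h')
          · exact Or.inr h'
    · refine List.pairwise_cons.mpr ⟨?_, ih3⟩
      intro q hq
      exact hlt q.1 ((ih2 q.1).mp (List.mem_map_of_mem hq))

lemma pv_agree (xs : List String) :
    rank_sentence_by_redundant_words xs = rank_sentence_by_redundant_words_alt xs := by
  show PySem.List.sorted
      (List.foldl (fun d r =>
        if d.contains r = false then d.insert r 1 else d.insert r (d.getD r 0 + 1))
        PySem.Dict.empty xs).items (fun x => x.1) false
      = pvGroupRuns (PySem.List.sorted xs (fun x => x) false)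
  rw [pvFoldA_eq_counter, PySem.Dict.items_counter]
  set s := PySem.List.sorted xs (fun x => x) false with hs
  have hsp : s.Pairwise (· ≤ ·) := by
    simpa using PySem.List.sorted_pairwise xs (fun x => x)
  obtain ⟨h1, h2, h3⟩ := pvGroupRuns_spec s hsp
  have hperm : s.Perm xs := PySem.List.sorted_perm xs _ false
  have hkn : ((pvGroupRuns s).map Prod.fst).Nodup :=
    List.pairwise_map.mpr (h3.imp ne_of_lt)
  have hpermkeys : ((pvGroupRuns s).map Prod.fst).Perm (PySem.Set.ofList xs) :=
    (List.perm_ext_iff_of_nodup hkn (PySem.Set.nodup_ofList xs)).mpr (fun k => by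
      rw [h2 k, PySem.Set.mem_ofList]; exact hperm.mem_iff)
  have hB : pvGroupRuns s
      = ((pvGroupRuns s).map Prod.fst).map (fun k => (k, (List.count k xs : Int))) := by
    rw [List.map_map]
    conv_lhs => rw [← List.map_id (pvGroupRuns s)]
    apply List.map_congr_left
    intro p hp
    have hv := h1 p hp
    have hc : List.count p.1 s = List.count p.1 xs := hperm.count_eq p.1
    obtain ⟨k, v⟩ := p
    simp only [id, Function.comp] at *
    rw [hv, hc]
  have hperm2 : (pvGroupRuns s).Perm
      ((PySem.Set.ofList xs).map (fun k => (k, (List.count k xs : Int)))) := by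
    rw [hB]; exact hpermkeys.map _
  exact PySem.List.sorted_eq_of_perm_of_pairwise_lt _ _ _ hperm2 h3

-- ===== VERDICT (by name: the statement is the Claim_ definition above) =====
theorem rank_sentence_by_redundant_words_spec : Claim_equal_rank_sentence_by_redundant_words := by
  intro redundants _
  unfold Spec_rank_sentence_by_redundant_words
  exact pv_agree redundants
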